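-- pv_equiv track=rewrite | github.com/yrks12/natan-transcribe | app/srt_generator.py | validate_srt
-- ===== SOURCE A (Python) =====
-- def validate_srt(srt_content: str) -> bool:
--     """Validate SRT file format."""
--     if not srt_content:
--         return False
--
--     # Basic validation - check for required elements
--     lines = srt_content.strip().split('\n')
--
--     # Should have at least one subtitle (4 lines minimum)
--     if len(lines) < 4:
--         return False
--
--     # Check for sequence numbers and timestamps
--     has_sequence = any(line.strip().isdigit() for line in lines)
--     has_timestamp = any('-->' in line for line in lines)
--
--     return has_sequence and has_timestamp
-- ===== SOURCE B (Python) =====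
-- def validate_srt(srt_content: str) -> bool:
--     """Validate SRT format in one character-level scan (streaming state machine, no line splitting)."""
--     core = srt_content.strip()
--     if not core:
--         return False
--
--     newlines = 0
--     has_sequence = False
--     has_timestamp = False
--     line_state = 0   # 0: only whitespace so far, 1: ws* digits+, 2: ws* digits+ ws+, 3: not a bare number line
--     dash_run = 0     # how much of '-->' is matched so far (0, 1 or 2)
--     for c in core:
--         if c == '\n':
--             newlines += 1
--             if line_state == 1 or line_state == 2:
--                 has_sequence = True
--             line_state = 0
--             dash_run = 0
--         else:
--             if '0' <= c <= '9':
--                 line_state = 1 if line_state <= 1 else 3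
--             elif c == ' ' or c == '\t' or c == '\r':
--                 if line_state == 1:
--                     line_state = 2
--             else:
--                 line_state = 3
--             if c == '-':
--                 dash_run = dash_run + 1 if dash_run < 2 else 2
--             elif c == '>' and dash_run == 2:
--                 has_timestamp = True
--                 dash_run = 0
--             else:
--                 dash_run = 0
--     if line_state == 1 or line_state == 2:
--         has_sequence = True
--     return newlines >= 3 and has_sequence and has_timestamp
-- ===== Notes on version B (the rewrite author's own statement) =====
-- stated objective: alternative
-- what changed: Replaced strip + line splitting + two any(...) scans over a list of line strings by a single character-level pass over the stripped string: a streaming state machine that counts line breaks, runs a whitespace*digits+whitespace* per-line automaton for the sequence check and a KMP-style three-state matcher for the timestamp arrow, building no intermediate line list.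
import Mathlib
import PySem

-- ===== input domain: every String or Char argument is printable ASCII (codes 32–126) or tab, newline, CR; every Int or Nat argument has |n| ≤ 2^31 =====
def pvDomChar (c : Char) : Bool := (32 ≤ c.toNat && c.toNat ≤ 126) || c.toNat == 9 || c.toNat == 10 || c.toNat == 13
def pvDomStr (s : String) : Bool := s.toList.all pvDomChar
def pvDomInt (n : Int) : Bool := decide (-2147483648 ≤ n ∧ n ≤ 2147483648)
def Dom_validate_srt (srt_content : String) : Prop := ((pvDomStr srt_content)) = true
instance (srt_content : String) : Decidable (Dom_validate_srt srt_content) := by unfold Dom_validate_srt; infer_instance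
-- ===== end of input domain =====

-- B replaces A's strip + split('\n') + two any(...) scans over a line list by a single
-- character-level pass: a streaming state machine (newline counter, a ws*digits+ws* per-line
-- automaton, a 3-state matcher for '-->') that builds no intermediate line list.

-- ===== PORT A =====
def validate_srt (srt_content : String) : Bool :=
  if srt_content = "" then false
  else
    let lines := PySem.Chars.splitOn (PySem.Chars.strip srt_content.toList) ['\n']
    if lines.length < 4 then false
    else
      let has_sequence := lines.any (fun line => PySem.Chars.strIsdigit (PySem.Chars.strip line))
      let has_timestamp := lines.any (fun line => PySem.Chars.isIn "-->".toList line)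
      has_sequence && has_timestamp

-- ===== PORT B =====
-- state of Source B's loop: newline count, the two flags, line_state, dash_run
structure SrtState where
  nl : Nat
  hs : Bool
  ht : Bool
  ls : Nat
  dr : Nat

-- `line_state == 1 or line_state == 2`
def srtAccept (ls : Nat) : Bool := ls == 1 || ls == 2

-- the per-character update of `line_state`
def srtLsStep (ls : Nat) (c : Char) : Nat :=
  if PySem.Chars.isdigit c then (if ls ≤ 1 then 1 else 3)
  else if c = ' ' ∨ c = '\t' ∨ c = '\r' then (if ls = 1 then 2 else ls)
  else 3

-- the per-character update of `dash_run`
def srtDrStep (dr : Nat) (c : Char) : Nat :=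
  if c = '-' then (if dr < 2 then dr + 1 else 2) else 0

-- `c == '>' and dash_run == 2` (the moment has_timestamp is set)
def srtTsHit (dr : Nat) (c : Char) : Bool := c == '>' && dr == 2

-- one iteration of Source B's `for c in core` body
def srtStep (st : SrtState) (c : Char) : SrtState :=
  if c = '\n' then ⟨st.nl + 1, st.hs || srtAccept st.ls, st.ht, 0, 0⟩
  else ⟨st.nl, st.hs, st.ht || srtTsHit st.dr c, srtLsStep st.ls c, srtDrStep st.dr c⟩

def validate_srt_alt (srt_content : String) : Bool :=
  let core := PySem.Chars.strip srt_content.toList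
  if core.isEmpty then false
  else
    let fin := core.foldl srtStep ⟨0, false, false, 0, 0⟩
    let has_sequence := fin.hs || srtAccept fin.ls
    decide (3 ≤ fin.nl) && has_sequence && fin.ht

-- ===== PRECONDITION & SPEC =====
def Spec_validate_srt (srt_content : String) (out : Bool) : Prop := out = validate_srt_alt srt_content
instance (srt_content : String) (out : Bool) : Decidable (Spec_validate_srt srt_content out) := by unfold Spec_validate_srt; infer_instance

-- ===== CLAIM (what is proved, stated in full; the proofs are below) =====
def Claim_equal_validate_srt : Prop := ∀ (srt_content : String), Dom_validate_srt srt_content → Spec_validate_srt srt_content (validate_srt srt_content)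

-- ===== LEMMAS AND PROOFS =====

-- the recursion splitOn core ['\n'] follows (proved below in splitOn_eq_lineSplit)
def lineSplit : List Char → List (List Char)
  | [] => [[]]
  | c :: l => if c = '\n' then [] :: lineSplit l else (lineSplit l).modifyHead (c :: ·)

-- "run the line automaton from state ls over a whole line and accept"
def accFrom (ls : Nat) (l : List Char) : Bool := srtAccept (l.foldl srtLsStep ls)

-- "running the dash matcher from run dr over l sets has_timestamp"
def tsFrom (dr : Nat) : List Char → Bool
  | [] => false
  | c :: l => srtTsHit dr c || tsFrom (srtDrStep dr c) l

theorem char_eq_iff_toNat (c d : Char) : c = d ↔ c.toNat = d.toNat := by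
  constructor
  · intro h; rw [h]
  · intro h; exact Char.ext (UInt32.toNat_inj.mp h)

theorem char_le_iff_toNat (c d : Char) : c ≤ d ↔ c.toNat ≤ d.toNat := by
  rw [Char.le_def, UInt32.le_iff_toNat_le]; rfl

theorem wsb_eq_isspace (c : Char) (hc : pvDomChar c = true) (hne : c ≠ '\n') :
    decide (c = ' ' ∨ c = '\t' ∨ c = '\r') = PySem.Chars.isspace c := by
  unfold pvDomChar at hc
  rw [Ne, char_eq_iff_toNat c '\n'] at hne
  simp only [Bool.or_eq_true, Bool.and_eq_true, decide_eq_true_eq, beq_iff_eq] at hc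
  simp only [PySem.Chars.isspace, char_eq_iff_toNat]
  have h9 : ('\t').toNat = 9 := by decide
  have h13 : ('\r').toNat = 13 := by decide
  have h32 : (' ').toNat = 32 := by decide
  have h10 : ('\n').toNat = 10 := by decide
  rw [h9, h13, h32]; rw [h10] at hne
  rw [Bool.eq_iff_iff]
  simp only [decide_eq_true_eq, Bool.or_eq_true, Bool.and_eq_true]
  omega

theorem dig_toNat (c : Char) (h : PySem.Chars.isdigit c = true) :
    48 ≤ c.toNat ∧ c.toNat ≤ 57 := by
  unfold PySem.Chars.isdigit at h
  simp only [Bool.and_eq_true, decide_eq_true_eq] at h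
  rw [char_le_iff_toNat] at h
  obtain ⟨h1, h2⟩ := h
  rw [char_le_iff_toNat] at h2
  constructor <;> [exact h1; exact h2]

theorem dig_not_ws (c : Char) (h : PySem.Chars.isdigit c = true) :
    PySem.Chars.isspace c = false := by
  have hd := dig_toNat c h
  unfold PySem.Chars.isspace
  simp only [Bool.or_eq_true, Bool.and_eq_true, decide_eq_true_eq, Bool.eq_false_iff, Ne]
  intro hcon
  omega

theorem wsb_isspace (c : Char) (h : c = ' ' ∨ c = '\t' ∨ c = '\r') :
    PySem.Chars.isspace c = true := by
  rcases h with h | h | h <;> subst h <;> decide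

-- ---- splitOn = lineSplit ----
theorem lineSplit_ne_nil (cs : List Char) : lineSplit cs ≠ [] := by
  cases cs with
  | nil => simp [lineSplit]
  | cons c l =>
      simp only [lineSplit]
      split
      · simp
      · cases h : lineSplit l with
        | nil => exact absurd h (lineSplit_ne_nil l)
        | cons a as => simp [List.modifyHead]

theorem splitOn_go_eq (l : List Char) : ∀ (fuel : Nat) (cur : List Char) (acc : List (List Char)),
    l.length ≤ fuel →
    PySem.Chars.splitOn.go ['\n'] fuel l cur acc
      = acc.reverse ++ (lineSplit l).modifyHead (fun x => cur.reverse ++ x) := by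
  induction l with
  | nil =>
      intro fuel cur acc _
      cases fuel <;> simp [PySem.Chars.splitOn.go, lineSplit, List.modifyHead]
  | cons c rest ih =>
      intro fuel cur acc hf
      cases fuel with
      | zero => simp at hf
      | succ fuel =>
          rw [PySem.Chars.splitOn.go]
          by_cases hc : c = '\n'
          · subst hc
            have hpre : List.isPrefixOf ['\n'] ('\n' :: rest) = true := by
              simp [List.isPrefixOf]
            simp only [hpre, if_pos, List.length_singleton, List.drop_succ_cons, List.drop]
            rw [ih fuel [] (cur.reverse :: acc) (by simpa using Nat.le_of_succ_le_succ hf)]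
            obtain ⟨L0, Ls, hL⟩ : ∃ L0 Ls, lineSplit rest = L0 :: Ls := by
              cases h : lineSplit rest with
              | nil => exact absurd h (lineSplit_ne_nil rest)
              | cons a as => exact ⟨a, as, rfl⟩
            simp [lineSplit, hL, List.modifyHead]
          · have hpre : List.isPrefixOf ['\n'] (c :: rest) = false := by
              simp [List.isPrefixOf]
              exact fun h => hc h.symm
            simp only [hpre, Bool.false_eq_true, if_false]
            rw [ih fuel (c :: cur) acc (by simpa using Nat.le_of_succ_le_succ hf)]
            obtain ⟨L0, Ls, hL⟩ : ∃ L0 Ls, lineSplit rest = L0 :: Ls := by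
              cases h : lineSplit rest with
              | nil => exact absurd h (lineSplit_ne_nil rest)
              | cons a as => exact ⟨a, as, rfl⟩
            simp [lineSplit, hc, hL, List.modifyHead]

theorem splitOn_eq_lineSplit (cs : List Char) :
    PySem.Chars.splitOn cs ['\n'] = lineSplit cs := by
  rw [PySem.Chars.splitOn, splitOn_go_eq cs (cs.length+1) [] [] (by omega)]
  obtain ⟨L0, Ls, hL⟩ : ∃ L0 Ls, lineSplit cs = L0 :: Ls := by
    cases h : lineSplit cs with
    | nil => exact absurd h (lineSplit_ne_nil cs)
    | cons a as => exact ⟨a, as, rfl⟩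
  simp [hL, List.modifyHead]

theorem lineSplit_mem (cs : List Char) :
    ∀ l ∈ lineSplit cs, (∀ c ∈ l, c ∈ cs) ∧ '\n' ∉ l := by
  induction cs with
  | nil => intro l hl; simp [lineSplit] at hl; simp [hl]
  | cons c rest ih =>
      intro l hl
      by_cases hc : c = '\n'
      · subst hc
        rw [lineSplit, if_pos rfl] at hl
        rcases List.mem_cons.mp hl with rfl | hl
        · simp
        · obtain ⟨h1, h2⟩ := ih l hl
          exact ⟨fun x hx => List.mem_cons_of_mem _ (h1 x hx), h2⟩
      · obtain ⟨L0, Ls, hL⟩ : ∃ L0 Ls, lineSplit rest = L0 :: Ls := by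
          cases h : lineSplit rest with
          | nil => exact absurd h (lineSplit_ne_nil rest)
          | cons a as => exact ⟨a, as, rfl⟩
        simp only [lineSplit, if_neg hc, hL, List.modifyHead, List.mem_cons] at hl
        obtain ⟨hh1, hh2⟩ := ih L0 (by simp [hL])
        rcases hl with rfl | hl
        · constructor
          · intro x hx
            rcases List.mem_cons.mp hx with rfl | hx
            · exact List.mem_cons_self
            · exact List.mem_cons_of_mem _ (hh1 x hx)
          · intro hx
            rcases List.mem_cons.mp hx with rfl | hx
            · exact hc rfl
            · exact hh2 hx
        · obtain ⟨h1, h2⟩ := ih l (by simp [hL, hl])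
          exact ⟨fun x hx => List.mem_cons_of_mem _ (h1 x hx), h2⟩

-- ---- the main loop invariant: folding srtStep over cs is determined by lineSplit cs ----
theorem srtRun (cs : List Char) (st : SrtState) (L0 : List Char) (Ls : List (List Char))
    (h : lineSplit cs = L0 :: Ls) :
    (cs.foldl srtStep st).nl = st.nl + Ls.length ∧
    ((cs.foldl srtStep st).hs || srtAccept (cs.foldl srtStep st).ls)
      = (st.hs || accFrom st.ls L0 || Ls.any (accFrom 0)) ∧
    (cs.foldl srtStep st).ht = (st.ht || tsFrom st.dr L0 || Ls.any (tsFrom 0)) := by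
  induction cs generalizing st L0 Ls with
  | nil =>
      simp only [lineSplit] at h
      injection h.symm with h1 h2
      subst h1; subst h2
      simp [accFrom, tsFrom]
  | cons c rest ih =>
      by_cases hc : c = '\n'
      · subst hc
        rw [lineSplit, if_pos rfl] at h
        obtain ⟨L0', Ls', hL⟩ : ∃ L0' Ls', lineSplit rest = L0' :: Ls' := by
          cases hx : lineSplit rest with
          | nil => exact absurd hx (lineSplit_ne_nil rest)
          | cons a as => exact ⟨a, as, rfl⟩
        rw [hL] at h
        injection h.symm with h1 h2
        subst h1; subst h2
        have hstep : srtStep st '\n' = ⟨st.nl + 1, st.hs || srtAccept st.ls, st.ht, 0, 0⟩ := by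
          simp [srtStep]
        obtain ⟨ih1, ih2, ih3⟩ := ih (⟨st.nl + 1, st.hs || srtAccept st.ls, st.ht, 0, 0⟩) L0' Ls' hL
        refine ⟨?_, ?_, ?_⟩
        · simp only [List.foldl_cons, hstep, ih1, List.length_cons]; omega
        · simp only [List.foldl_cons, hstep, ih2, accFrom, List.foldl_nil, List.any_cons]
          simp [Bool.or_assoc]
        · simp only [List.foldl_cons, hstep, ih3, tsFrom, List.any_cons]
          simp [Bool.or_assoc]
      · rw [lineSplit, if_neg hc] at h
        obtain ⟨L0', Ls', hL⟩ : ∃ L0' Ls', lineSplit rest = L0' :: Ls' := by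
          cases hx : lineSplit rest with
          | nil => exact absurd hx (lineSplit_ne_nil rest)
          | cons a as => exact ⟨a, as, rfl⟩
        rw [hL] at h
        simp only [List.modifyHead] at h
        injection h.symm with h1 h2
        subst h1; subst h2
        have hstep : srtStep st c
            = ⟨st.nl, st.hs, st.ht || srtTsHit st.dr c, srtLsStep st.ls c, srtDrStep st.dr c⟩ := by
          simp [srtStep, hc]
        obtain ⟨ih1, ih2, ih3⟩ :=
          ih (⟨st.nl, st.hs, st.ht || srtTsHit st.dr c, srtLsStep st.ls c, srtDrStep st.dr c⟩) L0' Ls hL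
        refine ⟨?_, ?_, ?_⟩
        · simp only [List.foldl_cons, hstep, ih1]
        · simp only [List.foldl_cons, hstep, ih2, accFrom, List.foldl_cons]
        · simp only [List.foldl_cons, hstep, ih3, tsFrom]
          simp [Bool.or_assoc]

-- ---- line automaton vs strip/isdigit ----
theorem foldl_ls3 (l : List Char) : l.foldl srtLsStep 3 = 3 := by
  induction l with
  | nil => rfl
  | cons c rest ih =>
      have h : srtLsStep 3 c = 3 := by
        unfold srtLsStep
        split
        · simp
        · split
          · simp
          · rfl
      rw [List.foldl_cons, h, ih]

theorem accFrom_two (l : List Char) (hdom : ∀ c ∈ l, pvDomChar c = true) (hnl : '\n' ∉ l) :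
    accFrom 2 l = l.all PySem.Chars.isspace := by
  induction l with
  | nil => rfl
  | cons c rest ih =>
      have hd := hdom c List.mem_cons_self
      have hn : c ≠ '\n' := fun hcn => hnl (hcn ▸ List.mem_cons_self)
      by_cases hdig : PySem.Chars.isdigit c = true
      · have : srtLsStep 2 c = 3 := by unfold srtLsStep; rw [if_pos hdig]; rfl
        unfold accFrom
        rw [List.foldl_cons, this, foldl_ls3]
        simp [srtAccept, dig_not_ws c hdig]
      · by_cases hw : c = ' ' ∨ c = '\t' ∨ c = '\r'
        · have : srtLsStep 2 c = 2 := by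
            unfold srtLsStep
            rw [if_neg (by simp [hdig]), if_pos hw]
            rfl
          unfold accFrom
          rw [List.foldl_cons, this]
          have := ih (fun x hx => hdom x (List.mem_cons_of_mem _ hx))
            (fun hx => hnl (List.mem_cons_of_mem _ hx))
          unfold accFrom at this
          rw [this]
          simp [wsb_isspace c hw]
        · have : srtLsStep 2 c = 3 := by
            unfold srtLsStep
            rw [if_neg (by simp [hdig]), if_neg hw]
          unfold accFrom
          rw [List.foldl_cons, this, foldl_ls3]
          have hws : PySem.Chars.isspace c = false := by
            rw [← wsb_eq_isspace c hd hn]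
            simp [hw]
          simp [srtAccept, hws]

theorem accFrom_one (l : List Char) (hdom : ∀ c ∈ l, pvDomChar c = true) (hnl : '\n' ∉ l) :
    accFrom 1 l = (l.dropWhile PySem.Chars.isdigit).all PySem.Chars.isspace := by
  induction l with
  | nil => rfl
  | cons c rest ih =>
      have hd := hdom c List.mem_cons_self
      have hn : c ≠ '\n' := fun hcn => hnl (hcn ▸ List.mem_cons_self)
      have hdomr : ∀ x ∈ rest, pvDomChar x = true := fun x hx => hdom x (List.mem_cons_of_mem _ hx)
      have hnlr : '\n' ∉ rest := fun hx => hnl (List.mem_cons_of_mem _ hx)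
      by_cases hdig : PySem.Chars.isdigit c = true
      · have : srtLsStep 1 c = 1 := by unfold srtLsStep; rw [if_pos hdig]; rfl
        unfold accFrom
        rw [List.foldl_cons, this]
        have := ih hdomr hnlr
        unfold accFrom at this
        rw [this, List.dropWhile_cons, if_pos hdig]
      · by_cases hw : c = ' ' ∨ c = '\t' ∨ c = '\r'
        · have : srtLsStep 1 c = 2 := by
            unfold srtLsStep
            rw [if_neg (by simp [hdig]), if_pos hw]
            rfl
          unfold accFrom
          rw [List.foldl_cons, this]
          have h2 := accFrom_two rest hdomr hnlr
          unfold accFrom at h2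
          rw [h2, List.dropWhile_cons, if_neg (by simp [hdig])]
          simp [wsb_isspace c hw]
        · have : srtLsStep 1 c = 3 := by
            unfold srtLsStep
            rw [if_neg (by simp [hdig]), if_neg hw]
          unfold accFrom
          rw [List.foldl_cons, this, foldl_ls3, List.dropWhile_cons, if_neg (by simp [hdig])]
          have hws : PySem.Chars.isspace c = false := by
            rw [← wsb_eq_isspace c hd hn]
            simp [hw]
          simp [srtAccept, hws]

theorem rstrip_eq_nil_iff (t : List Char) :
    PySem.Chars.rstrip t = [] ↔ ∀ x ∈ t, PySem.Chars.isspace x = true := by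
  unfold PySem.Chars.rstrip
  rw [List.reverse_eq_nil_iff, List.dropWhile_eq_nil_iff]
  constructor
  · intro h x hx; exact h x (List.mem_reverse.mpr hx)
  · intro h x hx; exact h x (List.mem_reverse.mp hx)

theorem rstrip_append_ws (a t : List Char) (h : ∀ x ∈ t, PySem.Chars.isspace x = true) :
    PySem.Chars.rstrip (a ++ t) = PySem.Chars.rstrip a := by
  unfold PySem.Chars.rstrip
  rw [List.reverse_append, List.dropWhile_append]
  have ht : List.dropWhile PySem.Chars.isspace t.reverse = [] :=
    List.dropWhile_eq_nil_iff.mpr (fun x hx => h x (List.mem_reverse.mp hx))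
  rw [ht]
  simp

theorem rstrip_append_keep (a t : List Char) (h : PySem.Chars.rstrip t ≠ []) :
    PySem.Chars.rstrip (a ++ t) = a ++ PySem.Chars.rstrip t := by
  unfold PySem.Chars.rstrip at *
  rw [List.reverse_append, List.dropWhile_append]
  have ht : (List.dropWhile PySem.Chars.isspace t.reverse).isEmpty = false := by
    rw [List.isEmpty_eq_false_iff]
    intro hx
    exact h (by rw [hx]; rfl)
  rw [ht]
  simp

theorem rstrip_prefix (t : List Char) : PySem.Chars.rstrip t <+: t := by
  unfold PySem.Chars.rstrip
  have h := List.dropWhile_suffix (l := t.reverse) PySem.Chars.isspace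
  have := List.reverse_prefix.mpr h
  simpa using this

theorem rstrip_eq_self (a : List Char) (h : ∀ x ∈ a, PySem.Chars.isspace x = false) :
    PySem.Chars.rstrip a = a := by
  unfold PySem.Chars.rstrip
  rw [List.dropWhile_eq_self_iff.mpr, List.reverse_reverse]
  intro hl
  have hmem : a.reverse[0] ∈ a := List.mem_reverse.mp (List.getElem_mem hl)
  exact fun hcon => by rw [h _ hmem] at hcon; exact Bool.false_ne_true hcon

theorem strIsdigit_rstrip (c : Char) (l : List Char) (hc : PySem.Chars.isdigit c = true) :
    PySem.Chars.strIsdigit (PySem.Chars.rstrip (c :: l))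
      = (l.dropWhile PySem.Chars.isdigit).all PySem.Chars.isspace := by
  have hsplit : l.takeWhile PySem.Chars.isdigit ++ l.dropWhile PySem.Chars.isdigit = l :=
    List.takeWhile_append_dropWhile
  set dw := l.takeWhile PySem.Chars.isdigit with hdw
  set t := l.dropWhile PySem.Chars.isdigit with ht
  have hform : c :: l = (c :: dw) ++ t := by rw [← hsplit]; rfl
  by_cases hall : ∀ x ∈ t, PySem.Chars.isspace x = true
  · have hr1 : PySem.Chars.rstrip (c :: l) = c :: dw := by
      rw [hform, rstrip_append_ws _ _ hall]
      apply rstrip_eq_self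
      intro x hx
      rcases List.mem_cons.mp hx with rfl | hx
      · exact dig_not_ws _ hc
      · exact dig_not_ws _ (List.mem_takeWhile_imp hx)
    rw [hr1]
    have h1 : PySem.Chars.strIsdigit (c :: dw) = true := by
      unfold PySem.Chars.strIsdigit
      simp only [List.isEmpty_cons, Bool.not_false, Bool.true_and, List.all_cons, hc]
      exact List.all_eq_true.mpr (fun x hx => List.mem_takeWhile_imp hx)
    rw [h1, Eq.comm, List.all_eq_true]
    exact fun x hx => hall x hx
  · have hne : PySem.Chars.rstrip t ≠ [] := by
      rw [Ne, rstrip_eq_nil_iff]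
      exact hall
    have hr1 : PySem.Chars.rstrip (c :: l) = (c :: dw) ++ PySem.Chars.rstrip t := by
      rw [hform, rstrip_append_keep _ _ hne]
    rw [hr1]
    obtain ⟨y, ys, hy⟩ : ∃ y ys, PySem.Chars.rstrip t = y :: ys := by
      cases hx : PySem.Chars.rstrip t with
      | nil => exact absurd hx hne
      | cons a as => exact ⟨a, as, rfl⟩
    have htne : t ≠ [] := by
      intro h0
      rw [h0] at hy
      simp [PySem.Chars.rstrip] at hy
    have hyd : PySem.Chars.isdigit y = false := by
      have hpre := rstrip_prefix t
      rw [hy] at hpre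
      obtain ⟨r, hr⟩ := hpre
      have ht2 : t = y :: (ys ++ r) := by rw [← hr]; simp
      have h3 := List.head?_dropWhile_not PySem.Chars.isdigit l
      rw [← ht, ht2] at h3
      simpa using h3
    have hleft : PySem.Chars.strIsdigit ((c :: dw) ++ PySem.Chars.rstrip t) = false := by
      unfold PySem.Chars.strIsdigit
      rw [hy]
      simp only [Bool.and_eq_false_iff]
      right
      rw [List.all_eq_false]
      exact ⟨y, by simp, by simp [hyd]⟩
    rw [hleft, Eq.comm, List.all_eq_false]
    push Not at hall
    obtain ⟨x, hx1, hx2⟩ := hall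
    exact ⟨x, hx1, by simp [hx2]⟩

theorem accFrom_zero (l : List Char) (hdom : ∀ c ∈ l, pvDomChar c = true) (hnl : '\n' ∉ l) :
    accFrom 0 l = PySem.Chars.strIsdigit (PySem.Chars.strip l) := by
  induction l with
  | nil => rfl
  | cons c rest ih =>
      have hd := hdom c List.mem_cons_self
      have hn : c ≠ '\n' := fun hcn => hnl (hcn ▸ List.mem_cons_self)
      have hdomr : ∀ x ∈ rest, pvDomChar x = true := fun x hx => hdom x (List.mem_cons_of_mem _ hx)
      have hnlr : '\n' ∉ rest := fun hx => hnl (List.mem_cons_of_mem _ hx)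
      by_cases hdig : PySem.Chars.isdigit c = true
      · have hstep : srtLsStep 0 c = 1 := by unfold srtLsStep; rw [if_pos hdig]; rfl
        unfold accFrom
        rw [List.foldl_cons, hstep]
        have h1 := accFrom_one rest hdomr hnlr
        unfold accFrom at h1
        rw [h1]
        have hls : PySem.Chars.strip (c :: rest) = PySem.Chars.rstrip (c :: rest) := by
          unfold PySem.Chars.strip PySem.Chars.lstrip
          rw [List.dropWhile_cons, if_neg (by simp [dig_not_ws c hdig])]
        rw [hls, strIsdigit_rstrip c rest hdig]
      · by_cases hw : c = ' ' ∨ c = '\t' ∨ c = '\r'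
        · have hstep : srtLsStep 0 c = 0 := by
            unfold srtLsStep
            rw [if_neg (by simp [hdig]), if_pos hw]
            rfl
          unfold accFrom
          rw [List.foldl_cons, hstep]
          have hstrip : PySem.Chars.strip (c :: rest) = PySem.Chars.strip rest := by
            unfold PySem.Chars.strip PySem.Chars.lstrip
            rw [List.dropWhile_cons, if_pos (wsb_isspace c hw)]
          rw [hstrip]
          exact ih hdomr hnlr
        · have hstep : srtLsStep 0 c = 3 := by
            unfold srtLsStep
            rw [if_neg (by simp [hdig]), if_neg hw]
          unfold accFrom
          rw [List.foldl_cons, hstep, foldl_ls3]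
          have hws : PySem.Chars.isspace c = false := by
            rw [← wsb_eq_isspace c hd hn]
            simp [hw]
          have hls : PySem.Chars.strip (c :: rest) = PySem.Chars.rstrip (c :: rest) := by
            unfold PySem.Chars.strip PySem.Chars.lstrip
            rw [List.dropWhile_cons, if_neg (by simp [hws])]
          rw [hls]
          cases h0 : PySem.Chars.rstrip (c :: rest) with
          | nil => rfl
          | cons y ys =>
              have hpre := rstrip_prefix (c :: rest)
              rw [h0] at hpre
              obtain ⟨r, hr⟩ := hpre
              have hyc : y = c := by
                have := hr
                simp only [List.cons_append] at this
                exact (List.cons.injEq .. ▸ this).1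
              subst hyc
              unfold PySem.Chars.strIsdigit
              simp [srtAccept, hdig]

-- ---- dash matcher vs substring search ----
theorem isIn_cons (p : List Char) (c : Char) (l : List Char) :
    PySem.Chars.isIn p (c :: l) = (p.isPrefixOf (c :: l) || PySem.Chars.isIn p l) := by
  rw [Bool.eq_iff_iff]
  rw [PySem.Chars.isIn_iff_infix]
  rw [Bool.or_eq_true, PySem.Chars.isIn_iff_infix, List.infix_cons_iff]
  rw [← List.isPrefixOf_iff_prefix]

theorem tsFrom_isIn (l : List Char) : ∀ dr : Nat, dr ≤ 2 →
    tsFrom dr l = PySem.Chars.isIn ['-', '-', '>'] (List.replicate dr '-' ++ l) := by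
  induction l with
  | nil =>
      intro dr hdr
      interval_cases dr <;> decide
  | cons c rest ih =>
      intro dr hdr
      by_cases hm : c = '-'
      · subst hm
        interval_cases dr
        · rw [show tsFrom 0 ('-' :: rest) = tsFrom 1 rest from by simp [tsFrom, srtTsHit, srtDrStep]]
          rw [ih 1 (by omega)]
          rfl
        · rw [show tsFrom 1 ('-' :: rest) = tsFrom 2 rest from by simp [tsFrom, srtTsHit, srtDrStep]]
          rw [ih 2 (by omega)]
          rfl
        · rw [show tsFrom 2 ('-' :: rest) = tsFrom 2 rest from by simp [tsFrom, srtTsHit, srtDrStep]]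
          rw [ih 2 (by omega)]
          simp only [List.replicate, List.cons_append, List.nil_append]
          rw [isIn_cons ['-', '-', '>'] '-' ('-' :: '-' :: rest)]
          rw [show (['-', '-', '>'].isPrefixOf ('-' :: '-' :: '-' :: rest)) = false from by
            simp [List.isPrefixOf]]
          simp
      · by_cases hgt : c = '>' ∧ dr = 2
        · obtain ⟨rfl, rfl⟩ := hgt
          rw [show tsFrom 2 ('>' :: rest) = true from by simp [tsFrom, srtTsHit]]
          rw [Eq.comm, PySem.Chars.isIn_iff_infix]
          exact ⟨[], rest, rfl⟩
        · have hts : srtTsHit dr c = false := by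
            unfold srtTsHit
            rcases Decidable.not_and_iff_or_not.mp hgt with h | h <;> simp [h]
          have hdr0 : srtDrStep dr c = 0 := by unfold srtDrStep; rw [if_neg hm]
          rw [show tsFrom dr (c :: rest) = tsFrom 0 rest from by
            simp [tsFrom, hts, hdr0]]
          rw [ih 0 (by omega)]
          have hcd : ('-' == c) = false := by simp [Ne.symm hm]
          interval_cases dr
          · simp only [List.replicate, List.nil_append]
            rw [isIn_cons]
            rw [show (['-', '-', '>'].isPrefixOf (c :: rest)) = false from by
              simp [List.isPrefixOf, hcd]]
            simp
          · simp only [List.replicate, List.cons_append, List.nil_append]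
            rw [isIn_cons, isIn_cons]
            rw [show (['-', '-', '>'].isPrefixOf ('-' :: c :: rest)) = false from by
              simp [List.isPrefixOf, hcd]]
            rw [show (['-', '-', '>'].isPrefixOf (c :: rest)) = false from by
              simp [List.isPrefixOf, hcd]]
            simp
          · simp only [List.replicate, List.cons_append, List.nil_append]
            rw [isIn_cons, isIn_cons, isIn_cons]
            rw [show (['-', '-', '>'].isPrefixOf ('-' :: '-' :: c :: rest)) = false from by
              have hgc : ('>' == c) = false := by
                simp only [beq_eq_false_iff_ne, Ne]
                exact fun h => hgt ⟨h.symm, rfl⟩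
              simp [List.isPrefixOf, hgc]]
            rw [show (['-', '-', '>'].isPrefixOf ('-' :: c :: rest)) = false from by
              simp [List.isPrefixOf, hcd]]
            rw [show (['-', '-', '>'].isPrefixOf (c :: rest)) = false from by
              simp [List.isPrefixOf, hcd]]
            simp

-- ---- assembly ----
theorem strip_subset (l : List Char) : ∀ c ∈ PySem.Chars.strip l, c ∈ l := by
  intro c hc
  unfold PySem.Chars.strip PySem.Chars.rstrip PySem.Chars.lstrip at hc
  rw [List.mem_reverse] at hc
  have h1 := (List.dropWhile_sublist PySem.Chars.isspace).mem hc
  rw [List.mem_reverse] at h1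
  exact (List.dropWhile_sublist PySem.Chars.isspace).mem h1

-- ===== VERDICT (by name: the statement is the Claim_ definition above) =====
theorem validate_srt_spec : Claim_equal_validate_srt := by
  intro s hdom
  unfold Spec_validate_srt validate_srt validate_srt_alt
  have hdoml : ∀ c ∈ s.toList, pvDomChar c = true := by
    unfold Dom_validate_srt pvDomStr at hdom
    rw [List.all_eq_true] at hdom
    exact hdom
  by_cases h0 : s = ""
  · subst h0
    rw [if_pos rfl]
    rw [show PySem.Chars.strip "".toList = [] from rfl]
    rfl
  · rw [if_neg h0]
    by_cases hcn : PySem.Chars.strip s.toList = []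
    · rw [hcn]
      rw [show PySem.Chars.splitOn [] ['\n'] = [[]] from by
        rw [splitOn_eq_lineSplit]; rfl]
      simp
    · have hcne : (PySem.Chars.strip s.toList).isEmpty = false := by
        rw [List.isEmpty_eq_false_iff]; exact hcn
      obtain ⟨L0, Ls, hL⟩ : ∃ L0 Ls, lineSplit (PySem.Chars.strip s.toList) = L0 :: Ls := by
        cases hx : lineSplit (PySem.Chars.strip s.toList) with
        | nil => exact absurd hx (lineSplit_ne_nil _)
        | cons a as => exact ⟨a, as, rfl⟩
      have hlinesDom : ∀ l ∈ L0 :: Ls, (∀ c ∈ l, pvDomChar c = true) ∧ '\n' ∉ l := by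
        intro l hl
        obtain ⟨h1, h2⟩ := lineSplit_mem (PySem.Chars.strip s.toList) l (hL ▸ hl)
        exact ⟨fun c hc => hdoml c (strip_subset s.toList c (h1 c hc)), h2⟩
      obtain ⟨hr1, hr2, hr3⟩ := srtRun (PySem.Chars.strip s.toList) ⟨0, false, false, 0, 0⟩ L0 Ls hL
      simp only [hcne, Bool.false_eq_true, if_false, splitOn_eq_lineSplit, hL]
      -- rewrite the B side using the loop characterization
      rw [hr1, hr2, hr3]
      simp only [Bool.false_or, Nat.zero_add]
      -- per-line equalities
      have hD : ∀ l ∈ L0 :: Ls, accFrom 0 l = PySem.Chars.strIsdigit (PySem.Chars.strip l) := by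
        intro l hl
        obtain ⟨hd, hn⟩ := hlinesDom l hl
        exact accFrom_zero l hd hn
      have hT : ∀ l : List Char, tsFrom 0 l = PySem.Chars.isIn "-->".toList l := by
        intro l
        rw [show ("-->".toList) = ['-', '-', '>'] from rfl]
        have := tsFrom_isIn l 0 (by omega)
        simpa using this
      have hDL0 : accFrom 0 L0 = PySem.Chars.strIsdigit (PySem.Chars.strip L0) :=
        hD L0 List.mem_cons_self
      have hDLs : Ls.any (accFrom 0)
          = Ls.any (fun line => PySem.Chars.strIsdigit (PySem.Chars.strip line)) :=
        PySem.List.any_congr_mem (fun x hx => hD x (List.mem_cons_of_mem _ hx))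
      have hTLs : Ls.any (tsFrom 0) = Ls.any (fun line => PySem.Chars.isIn "-->".toList line) :=
        PySem.List.any_congr_mem (fun x hx => hT x)
      rw [hDL0, hDLs, hT L0, hTLs]
      by_cases hlen : (L0 :: Ls).length < 4
      · rw [if_pos hlen]
        have : ¬ 3 ≤ Ls.length := by simp at hlen; omega
        simp [this]
      · rw [if_neg hlen]
        have h3 : 3 ≤ Ls.length := by simp at hlen; omega
        simp only [h3, decide_true, Bool.true_and, List.any_cons]
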